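-- pv_equiv track=rewrite | github.com/DaisyGuan/Algorithms | Interview/FB/325MaxSizeSubarraySumLen.py | maxSubArrayLen
-- ===== SOURCE A (Python) =====
-- def maxSubArrayLen(nums, k):
--     """
--     :type nums: List[int]
--     :type k: int
--     :rtype: int
--     """
--     currLen = 0
--     maxLen = 0
--     for i in range(len(nums)):
--         for j in range(i, len(nums)):
--             if sum(nums[i:j+1]) == k:
--                 currLen = j-i+1
--
--         maxLen = max(maxLen, currLen)
--
--     return maxLen
-- ===== SOURCE B (Python) =====
-- def maxSubArrayLen(nums, k):
--     # prefix sums + first-seen-index hashmap: one pass, O(n)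
--     first = {0: -1}
--     s = 0
--     best = 0
--     for j, x in enumerate(nums):
--         s += x
--         t = first.get(s - k)
--         if t is not None:
--             best = max(best, j - t)
--         if s not in first:
--             first[s] = j
--     return best
-- ===== Notes on version B (the rewrite author's own statement) =====
-- stated objective: faster
-- what changed: replaced the triple-nested scan (all start/end pairs with a fresh slice sum each) by a single pass keeping a running prefix sum and a hashmap of the first index at which each prefix value was seen
import Mathlib
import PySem

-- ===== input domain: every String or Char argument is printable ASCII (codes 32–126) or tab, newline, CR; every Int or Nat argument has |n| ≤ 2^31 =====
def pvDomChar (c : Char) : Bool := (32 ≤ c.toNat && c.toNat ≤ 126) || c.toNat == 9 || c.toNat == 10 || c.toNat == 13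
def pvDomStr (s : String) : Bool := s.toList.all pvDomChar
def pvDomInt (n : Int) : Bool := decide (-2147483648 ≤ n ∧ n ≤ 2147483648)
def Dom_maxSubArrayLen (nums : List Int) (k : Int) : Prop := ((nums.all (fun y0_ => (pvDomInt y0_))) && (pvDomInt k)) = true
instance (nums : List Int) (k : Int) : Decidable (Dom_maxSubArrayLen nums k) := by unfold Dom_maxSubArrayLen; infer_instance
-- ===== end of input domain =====

-- B replaces A's triple-nested all-pairs slice-sum scan by a single prefix-sum pass with a
-- first-seen-index hashmap (asymptotically faster); return values proved equal on all inputs.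

-- ===== PORT A =====
def maxSubArrayLen (nums : List Int) (k : Int) : Int :=
  ((PySem.List.pyRange 0 (nums.length : Int) 1).foldl
    (fun (st : Int × Int) i =>
      let currLen := (PySem.List.pyRange i (nums.length : Int) 1).foldl
        (fun c j => if (PySem.List.slice nums (some i) (some (j + 1))).sum = k then j - i + 1 else c)
        st.1
      (currLen, max st.2 currLen))
    (0, 0)).2

-- ===== PORT B =====
def maxSubArrayLen_alt (nums : List Int) (k : Int) : Int :=
  ((PySem.List.enumerate nums).foldl
    (fun (st : PySem.Dict Int Int × Int × Int) jx =>
      let s := st.2.1 + jx.2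
      let best := match st.1.get? (s - k) with
        | some t => max st.2.2 (jx.1 - t)
        | none => st.2.2
      let first := if st.1.contains s then st.1 else st.1.insert s jx.1
      (first, s, best))
    ((PySem.Dict.empty : PySem.Dict Int Int).insert 0 (-1), 0, 0)).2.2

-- ===== PRECONDITION & SPEC =====
def Spec_maxSubArrayLen (nums : List Int) (k : Int) (out : Int) : Prop := out = maxSubArrayLen_alt nums k
instance (nums : List Int) (k : Int) (out : Int) : Decidable (Spec_maxSubArrayLen nums k out) := by unfold Spec_maxSubArrayLen; infer_instance

-- ===== CLAIM (what is proved, stated in full; the proofs are below) =====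
def Claim_equal_maxSubArrayLen : Prop := ∀ (nums : List Int) (k : Int), Dom_maxSubArrayLen nums k → Spec_maxSubArrayLen nums k (maxSubArrayLen nums k)

-- ===== LEMMAS AND PROOFS =====

-- prefix sum of the first t elements
def pvP (nums : List Int) (t : Nat) : Int := (nums.take t).sum

-- pvGood nums k a b : the subarray nums[a:b] (nonempty, in range) sums to k
def pvGood (nums : List Int) (k : Int) (a b : Nat) : Prop :=
  a < b ∧ b ≤ nums.length ∧ pvP nums b - pvP nums a = k

-- pvBest v : v is the length of a longest k-sum subarray (0 if none)
def pvBest (nums : List Int) (k : Int) (v : Int) : Prop :=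
  0 ≤ v ∧ (v = 0 ∨ ∃ a b, pvGood nums k a b ∧ v = (b : Int) - (a : Int)) ∧
  ∀ a b, pvGood nums k a b → (b : Int) - (a : Int) ≤ v

-- the two loop bodies, named so the lemmas can speak about them (defeq to the ports' lambdas)
def pvStepA (nums : List Int) (k : Int) (st : Int × Int) (i : Int) : Int × Int :=
  let currLen := (PySem.List.pyRange i (nums.length : Int) 1).foldl
    (fun c j => if (PySem.List.slice nums (some i) (some (j + 1))).sum = k then j - i + 1 else c)
    st.1
  (currLen, max st.2 currLen)

def pvStepB (k : Int) (st : PySem.Dict Int Int × Int × Int) (jx : Int × Int) :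
    PySem.Dict Int Int × Int × Int :=
  let s := st.2.1 + jx.2
  let best := match st.1.get? (s - k) with
    | some t => max st.2.2 (jx.1 - t)
    | none => st.2.2
  let first := if st.1.contains s then st.1 else st.1.insert s jx.1
  (first, s, best)

lemma pvA_eq (nums : List Int) (k : Int) :
    maxSubArrayLen nums k =
      ((PySem.List.pyRange 0 (nums.length : Int) 1).foldl (pvStepA nums k) (0, 0)).2 := rfl

lemma pvB_eq (nums : List Int) (k : Int) :
    maxSubArrayLen_alt nums k =
      ((PySem.List.enumerate nums 0).foldl (pvStepB k)
        ((PySem.Dict.empty : PySem.Dict Int Int).insert 0 (-1), 0, 0)).2.2 := rfl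

lemma pvBest_unique {nums : List Int} {k v w : Int}
    (hv : pvBest nums k v) (hw : pvBest nums k w) : v = w := by
  obtain ⟨hv0, hvm, hvc⟩ := hv
  obtain ⟨hw0, hwm, hwc⟩ := hw
  rcases hvm with hv1 | ⟨a, b, hg, he⟩
  · rcases hwm with hw1 | ⟨a, b, hg, he⟩
    · omega
    · have := hvc a b hg; omega
  · have h1 := hwc a b hg
    rcases hwm with hw1 | ⟨a', b', hg', he'⟩
    · have := hvc a b hg; omega
    · have := hvc a' b' hg'; omega

lemma pvSum_drop_take (xs : List Int) (a m : Nat) :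
    ((xs.drop a).take m).sum = (xs.take (a + m)).sum - (xs.take a).sum := by
  have h : xs.take (a + m) = xs.take a ++ (xs.drop a).take m := List.take_add
  rw [h, List.sum_append]; ring

lemma pvP_succ (nums : List Int) (t : Nat) (x : Int) (h : nums.drop t = x :: (nums.drop (t+1))) :
    pvP nums (t + 1) = pvP nums t + x := by
  unfold pvP
  have h1 : nums.take (t + 1) = nums.take t ++ (nums.drop t).take 1 := List.take_add
  rw [h1, h]
  simp

-- the slice condition of A, for a ≤ b, is exactly the prefix-sum condition at (a, b+1)
lemma pvSlice_cond (nums : List Int) (k : Int) (a b : Nat) (hab : a ≤ b) :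
    ((PySem.List.slice nums (some (a : Int)) (some ((b : Int) + 1))).sum = k) ↔
    (pvP nums (b + 1) - pvP nums a = k) := by
  have hcast : ((b : Int) + 1) = ((b + 1 : Nat) : Int) := by push_cast; ring
  rw [hcast, PySem.List.slice_natCast]
  rw [pvSum_drop_take nums a (b + 1 - a)]
  have : a + (b + 1 - a) = b + 1 := by omega
  rw [this]
  unfold pvP
  constructor <;> intro h <;> linarith

-- ===== the inner loop of A: last-write fold over a strictly increasing list =====
lemma pvInner (Q : Int → Prop) [DecidablePred Q] (g : Int → Int) :
    ∀ (l : List Int), l.Pairwise (· < ·) → ∀ (c : Int),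
    (l.foldl (fun c j => if Q j then g j else c) c = c ∧ ∀ j ∈ l, ¬ Q j) ∨
    (∃ j ∈ l, Q j ∧ l.foldl (fun c j => if Q j then g j else c) c = g j ∧
      ∀ j' ∈ l, Q j' → j' ≤ j) := by
  intro l
  induction l with
  | nil => intro _ c; left; simp
  | cons a tl ih =>
    intro hp c
    have hpa : ∀ x ∈ tl, a < x := (List.pairwise_cons.mp hp).1
    have hptl : tl.Pairwise (· < ·) := (List.pairwise_cons.mp hp).2
    simp only [List.foldl_cons]
    rcases ih hptl (if Q a then g a else c) with ⟨heq, hno⟩ | ⟨j, hjmem, hQj, heq, hmax⟩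
    · by_cases hQa : Q a
      · right; refine ⟨a, by simp, hQa, ?_, ?_⟩
        · rw [heq]; simp [hQa]
        · intro j' hj' hQ'
          rcases List.mem_cons.mp hj' with rfl | hmem
          · exact le_refl _
          · exact absurd hQ' (hno j' hmem)
      · left; refine ⟨?_, ?_⟩
        · rw [heq]; simp [hQa]
        · intro j hj
          rcases List.mem_cons.mp hj with rfl | hmem
          · exact hQa
          · exact hno j hmem
    · right
      refine ⟨j, List.mem_cons_of_mem a hjmem, hQj, heq, ?_⟩
      intro j' hj' hQ'
      rcases List.mem_cons.mp hj' with rfl | hmem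
      · exact le_of_lt (hpa j hjmem)
      · exact hmax j' hmem hQ'

-- ===== outer loop of A =====
lemma pvOuterA (nums : List Int) (k : Int) :
    ∀ (l : List Int), (∀ i ∈ l, 0 ≤ i ∧ i < (nums.length : Int)) →
    ∀ (c m : Int), 0 ≤ c → c ≤ m →
    (c = 0 ∨ ∃ a b, pvGood nums k a b ∧ c = (b : Int) - (a : Int)) →
    (m = 0 ∨ ∃ a b, pvGood nums k a b ∧ m = (b : Int) - (a : Int)) →
    m ≤ (l.foldl (pvStepA nums k) (c, m)).2 ∧
    ((l.foldl (pvStepA nums k) (c, m)).2 = 0 ∨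
      ∃ a b, pvGood nums k a b ∧ (l.foldl (pvStepA nums k) (c, m)).2 = (b : Int) - (a : Int)) ∧
    (∀ a b, pvGood nums k a b → ((a : Nat) : Int) ∈ l →
      (b : Int) - (a : Int) ≤ (l.foldl (pvStepA nums k) (c, m)).2) := by
  intro l
  induction l with
  | nil =>
    intro _ c m hc0 hcm hcmem hmmem
    simp only [List.foldl_nil]
    exact ⟨le_refl m, hmmem, fun a b _ h => absurd h (List.not_mem_nil)⟩
  | cons i tl ih =>
    intro hmem c m hc0 hcm hcmem hmmem
    have hi := hmem i (by simp)
    have htl : ∀ x ∈ tl, 0 ≤ x ∧ x < (nums.length : Int) := fun x hx => hmem x (by simp [hx])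
    simp only [List.foldl_cons]
    rcases pvInner (fun j => (PySem.List.slice nums (some i) (some (j + 1))).sum = k)
        (fun j => j - i + 1)
        (PySem.List.pyRange i (nums.length : Int) 1)
        (PySem.List.pairwise_lt_pyRange_one i (nums.length : Int)) c with
      ⟨heq, hno⟩ | ⟨j, hjmem, hQj, heq, hmax⟩
    · -- no valid end for start i: state is (c, max m c) = (c, m)
      have hstep : pvStepA nums k (c, m) i = (c, m) := by
        simp only [pvStepA]
        rw [heq]
        have : max m c = m := by omega
        rw [this]
      rw [hstep]
      have h := ih htl c m hc0 hcm hcmem hmmem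
      refine ⟨h.1, h.2.1, ?_⟩
      intro a b hg hmem'
      rcases List.mem_cons.mp hmem' with hia | hmem''
      · exfalso
        obtain ⟨hab, hbn, hsum⟩ := hg
        have hjb : ((b : Int) - 1) ∈ PySem.List.pyRange i (nums.length : Int) 1 := by
          rw [PySem.List.mem_pyRange_one]
          omega
        apply hno _ hjb
        have ha' : i = ((a : Nat) : Int) := hia.symm
        have hbi : ((b : Int) - 1) = (((b - 1 : Nat)) : Int) := by omega
        rw [ha', hbi]
        have hle : a ≤ b - 1 := by omega
        rw [pvSlice_cond nums k a (b - 1) hle]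
        have hb : b - 1 + 1 = b := by omega
        rw [hb]; exact hsum
      · exact h.2.2 a b hg hmem''
    · -- inner fold returned j - i + 1 for the largest valid end j
      have hjr := (PySem.List.mem_pyRange_one).mp hjmem
      have hi0 : 0 ≤ i := hi.1
      set a0 : Nat := i.toNat with ha0
      set b0 : Nat := (j + 1).toNat with hb0
      have hia : i = ((a0 : Nat) : Int) := by omega
      have hjb : j = ((b0 : Int)) - 1 := by omega
      have hgood : pvGood nums k a0 b0 := by
        refine ⟨by omega, by omega, ?_⟩
        have hle : a0 ≤ b0 - 1 := by omega
        have hq := hQj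
        rw [hia] at hq
        have hj' : (j : Int) = (((b0 - 1 : Nat)) : Int) := by omega
        rw [hj'] at hq
        have hres := (pvSlice_cond nums k a0 (b0 - 1) hle).mp hq
        have hb : b0 - 1 + 1 = b0 := by omega
        rwa [hb] at hres
      have hstep : pvStepA nums k (c, m) i = (j - i + 1, max m (j - i + 1)) := by
        simp only [pvStepA]
        rw [heq]
      rw [hstep]
      have hc' : j - i + 1 = (b0 : Int) - (a0 : Int) := by omega
      have hc'0 : 0 ≤ j - i + 1 := by omega
      have h := ih htl (j - i + 1) (max m (j - i + 1)) hc'0 (le_max_right _ _)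
        (Or.inr ⟨a0, b0, hgood, hc'⟩)
        (by
          rcases hmmem with h0 | ⟨a, b, hg, he⟩
          · by_cases hmc : m ≤ j - i + 1
            · right; exact ⟨a0, b0, hgood, by omega⟩
            · left; omega
          · by_cases hmc : m ≤ j - i + 1
            · right; exact ⟨a0, b0, hgood, by omega⟩
            · right; exact ⟨a, b, hg, by omega⟩)
      refine ⟨le_trans (le_max_left _ _) h.1, h.2.1, ?_⟩
      intro a b hg hmem'
      rcases List.mem_cons.mp hmem' with hia' | hmem''
      · obtain ⟨hab, hbn, hsum⟩ := hg
        have hjb' : ((b : Int) - 1) ∈ PySem.List.pyRange i (nums.length : Int) 1 := by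
          rw [PySem.List.mem_pyRange_one]; omega
        have hQ' : (PySem.List.slice nums (some i) (some (((b : Int) - 1) + 1))).sum = k := by
          have ha' : i = ((a : Nat) : Int) := hia'.symm
          have hbi : ((b : Int) - 1) = (((b - 1 : Nat)) : Int) := by omega
          rw [ha', hbi]
          have hle : a ≤ b - 1 := by omega
          rw [pvSlice_cond nums k a (b - 1) hle]
          have hb : b - 1 + 1 = b := by omega
          rw [hb]; exact hsum
        have hje := hmax _ hjb' hQ'
        have h1 : (b : Int) - (a : Int) ≤ j - i + 1 := by omega
        have h2 : j - i + 1 ≤ max m (j - i + 1) := le_max_right _ _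
        exact le_trans h1 (le_trans h2 h.1)
      · exact h.2.2 a b hg hmem''

lemma pvA_best (nums : List Int) (k : Int) : pvBest nums k (maxSubArrayLen nums k) := by
  rw [pvA_eq]
  have h := pvOuterA nums k (PySem.List.pyRange 0 (nums.length : Int) 1)
    (by intro i hi; have := (PySem.List.mem_pyRange_one).mp hi; omega)
    0 0 le_rfl le_rfl (Or.inl rfl) (Or.inl rfl)
  refine ⟨le_trans le_rfl h.1, h.2.1, ?_⟩
  intro a b hg
  apply h.2.2 a b hg
  rw [PySem.List.mem_pyRange_one]
  obtain ⟨hab, hbn, _⟩ := hg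
  omega

-- ===== B side =====

-- the first index u ≤ t with prefix sum p
def pvFirstIdx (nums : List Int) (t : Nat) (p : Int) : Option Nat :=
  (List.range (t + 1)).find? (fun u => decide (pvP nums u = p))

lemma pvFirstIdx_some (nums : List Int) (t : Nat) (p : Int) (u : Nat)
    (hu : pvFirstIdx nums t p = some u) :
    u ≤ t ∧ pvP nums u = p ∧ ∀ v < u, pvP nums v ≠ p := by
  unfold pvFirstIdx at hu
  rw [List.find?_eq_some_iff_getElem] at hu
  obtain ⟨hQu, i, hi, hgi, hprev⟩ := hu
  simp only [List.getElem_range] at hgi hprev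
  subst hgi
  simp only [List.length_range] at hi
  refine ⟨by omega, by simpa using hQu, ?_⟩
  intro v hv hvp
  have := hprev v hv
  simp [hvp] at this

lemma pvFirstIdx_none (nums : List Int) (t : Nat) (p : Int)
    (hn : pvFirstIdx nums t p = none) : ∀ u ≤ t, pvP nums u ≠ p := by
  unfold pvFirstIdx at hn
  rw [List.find?_eq_none] at hn
  intro u hu hp
  have := hn u (List.mem_range.mpr (by omega))
  simp [hp] at this

lemma pvFirstIdx_succ (nums : List Int) (t : Nat) (p : Int) :
    pvFirstIdx nums (t + 1) p =
      (pvFirstIdx nums t p).or (if pvP nums (t + 1) = p then some (t + 1) else none) := by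
  unfold pvFirstIdx
  rw [List.range_succ, List.find?_append]
  congr 1
  simp [List.find?]
  split_ifs with h <;> simp [h]

-- B's loop invariant after having consumed the first t elements
def pvInvB (nums : List Int) (k : Int) (t : Nat) (st : PySem.Dict Int Int × Int × Int) : Prop :=
  st.2.1 = pvP nums t ∧
  (∀ p : Int, st.1.get? p = (pvFirstIdx nums t p).map (fun u : Nat => (u : Int) - 1)) ∧
  0 ≤ st.2.2 ∧
  (st.2.2 = 0 ∨ ∃ a b, pvGood nums k a b ∧ st.2.2 = (b : Int) - (a : Int)) ∧
  (∀ a b, pvGood nums k a b → b ≤ t → (b : Int) - (a : Int) ≤ st.2.2)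

lemma pvBfold (nums : List Int) (k : Int) :
    ∀ (l : List Int) (t : Nat), nums.drop t = l →
    ∀ st, pvInvB nums k t st →
    pvInvB nums k (t + l.length)
      ((PySem.List.enumerate l (t : Int)).foldl (pvStepB k) st) := by
  intro l
  induction l with
  | nil => intro t _ st h; simpa [PySem.List.enumerate_nil] using h
  | cons x tl ih =>
    intro t hdrop st hinv
    obtain ⟨hs, hd, hb0, hbm, hbc⟩ := hinv
    have hdrop' : nums.drop (t + 1) = tl := by
      have := congrArg List.tail hdrop
      simpa [List.tail_drop] using this
    have hx : nums.drop t = x :: nums.drop (t + 1) := by rw [hdrop', hdrop]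
    have hP : pvP nums (t + 1) = pvP nums t + x := pvP_succ nums t x hx
    have hlen1 : t + 1 ≤ nums.length := by
      have := congrArg List.length hx
      simp only [List.length_cons, List.length_drop] at this
      omega
    rw [PySem.List.enumerate_cons, List.foldl_cons]
    have hcast : (t : Int) + 1 = ((t + 1 : Nat) : Int) := by push_cast; ring
    rw [hcast]
    have hlen : t + (x :: tl).length = (t + 1) + tl.length := by simp; omega
    rw [hlen]
    apply ih (t + 1) hdrop'
    -- the invariant is preserved by one step
    show pvInvB nums k (t + 1)
      ((if st.1.contains (st.2.1 + x) then st.1 else st.1.insert (st.2.1 + x) ((t : Int))),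
       st.2.1 + x,
       (match st.1.get? (st.2.1 + x - k) with
        | some u => max st.2.2 ((t : Int) - u)
        | none => st.2.2))
    have hsP : st.2.1 + x = pvP nums (t + 1) := by rw [hs, hP]
    have hlook : st.1.get? (st.2.1 + x - k)
        = (pvFirstIdx nums t (pvP nums (t + 1) - k)).map (fun u : Nat => (u : Int) - 1) := by
      rw [hsP, hd]
    have hcont : st.1.contains (st.2.1 + x)
        = (pvFirstIdx nums t (pvP nums (t + 1))).isSome := by
      rw [PySem.Dict.contains_eq_isSome_get?, hsP, hd, Option.isSome_map]
    refine ⟨hsP, ?_, ?_⟩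
    · -- dict component
      intro p
      by_cases hc : (pvFirstIdx nums t (pvP nums (t + 1))).isSome
      · simp only [hcont, hc, if_pos]
        rw [hd p, pvFirstIdx_succ]
        obtain ⟨u, hu⟩ := Option.isSome_iff_exists.mp hc
        by_cases hp : p = pvP nums (t + 1)
        · subst hp; rw [hu]; simp
        · rcases h : pvFirstIdx nums t p with _ | u'
          · have hne : pvP nums (t + 1) ≠ p := fun hh => hp hh.symm
            simp [hne]
          · simp
      · have hc' : st.1.contains (st.2.1 + x) = false := by
          rw [hcont]; simpa using hc
        simp only [hc', Bool.false_eq_true, if_false]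
        have hnone : pvFirstIdx nums t (pvP nums (t + 1)) = none :=
          Option.not_isSome_iff_eq_none.mp hc
        rw [PySem.Dict.get?_insert, pvFirstIdx_succ]
        by_cases hp : p = st.2.1 + x
        · rw [if_pos hp, hp, hsP, hnone]
          simp
        · rw [if_neg hp, hd p]
          have hp' : pvP nums (t + 1) ≠ p := by rw [← hsP]; exact fun h => hp h.symm
          rcases h : pvFirstIdx nums t p with _ | u'
          · simp [hp']
          · simp
    · -- best component
      rcases h : pvFirstIdx nums t (pvP nums (t + 1) - k) with _ | u
      · rw [hlook, h]
        simp only [Option.map_none]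
        refine ⟨hb0, hbm, ?_⟩
        intro a b hg hbt
        rcases Nat.lt_or_ge b (t + 1) with hlt | hge
        · exact hbc a b hg (by omega)
        · have hb1 : b = t + 1 := by omega
          exfalso
          obtain ⟨hab, _, hsum⟩ := hg
          exact pvFirstIdx_none nums t _ h a (by omega) (by rw [hb1] at hsum; linarith)
      · rw [hlook, h]
        simp only [Option.map_some]
        obtain ⟨hut, hup, humin⟩ := pvFirstIdx_some nums t _ u h
        have hgood : pvGood nums k u (t + 1) := ⟨by omega, hlen1, by omega⟩
        refine ⟨?_, ?_, ?_⟩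
        · simp only [le_max_iff]; left; exact hb0
        · rcases le_total st.2.2 ((t : Int) - ((u : Int) - 1)) with hmc | hmc
          · rw [max_eq_right hmc]
            right; exact ⟨u, t + 1, hgood, by push_cast; omega⟩
          · rw [max_eq_left hmc]
            exact hbm
        · intro a b hg hbt
          rcases Nat.lt_or_ge b (t + 1) with hlt | hge
          · have := hbc a b hg (by omega)
            simp only [le_max_iff]; left; omega
          · have hb1 : b = t + 1 := by omega
            subst hb1
            obtain ⟨hab, _, hsum⟩ := hg
            have hau : u ≤ a := by
              by_contra hlt'
              exact humin a (by omega) (by omega)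
            simp only [le_max_iff]; right; push_cast; omega

lemma pvB_best (nums : List Int) (k : Int) : pvBest nums k (maxSubArrayLen_alt nums k) := by
  rw [pvB_eq]
  have hinit : pvInvB nums k 0 ((PySem.Dict.empty : PySem.Dict Int Int).insert 0 (-1), 0, 0) := by
    refine ⟨by simp [pvP], ?_, le_rfl, Or.inl rfl, ?_⟩
    · intro p
      rw [PySem.Dict.get?_insert]
      unfold pvFirstIdx
      by_cases hp : p = 0
      · subst hp
        simp [pvP, List.range_succ]
      · rw [if_neg hp]
        have hdec : decide (pvP nums 0 = p) = false := by
          simp only [pvP, List.take_zero, List.sum_nil, decide_eq_false_iff_not]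
          exact fun h => hp h.symm
        simp [List.range_succ, hdec, PySem.Dict.get?_empty]
    · intro a b hg hb; obtain ⟨hab, _, _⟩ := hg; omega
  have h := pvBfold nums k nums 0 (by simp) _ hinit
  simp only [Nat.zero_add, Nat.cast_zero] at h
  obtain ⟨_, _, hb0, hbm, hbc⟩ := h
  exact ⟨hb0, hbm, fun a b hg => hbc a b hg (by simp [hg.2.1])⟩

-- ===== VERDICT (by name: the statement is the Claim_ definition above) =====
theorem maxSubArrayLen_spec : Claim_equal_maxSubArrayLen := by
  intro nums k _
  unfold Spec_maxSubArrayLen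
  exact pvBest_unique (pvA_best nums k) (pvB_best nums k)
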